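-- pv_equiv track=rewrite | github.com/iamrishap/PythonBits | InterviewBits/dp/kingdom-war.py | solve
-- ===== SOURCE A (Python) =====
-- def solve(A):
--     n = len(A)
--     m = len(A[0])
--     if n < 1 or m < 1:
--         return 0
--     reversedprefix_arr = []
--     for arr in A:
--         prefix_arr_cur = [0] * m
--         prefix_arr_cur[m - 1] = arr[m - 1]
--         for j in range(m - 2, -1, -1):
--             prefix_arr_cur[j] = prefix_arr_cur[j + 1] + arr[j]
--         reversedprefix_arr.append(prefix_arr_cur)
--     arr = [0] * m
--     max_sum = A[-1][-1]
--     for i in range(n - 1, -1, -1):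
--         arr = [x + y for x, y in zip(arr, reversedprefix_arr[i])]
--         max_sum = max(max_sum, max(arr))
--     return max_sum
-- ===== SOURCE B (Python) =====
-- def _suffix_row(row, below, m):
--     # One fused inclusion-exclusion pass: S[j] = row[j] + S[j+1] + below[j] - below[j+1].
--     # Built rightmost-first, then reversed; returned with a trailing 0 sentinel.
--     rev = [0]
--     for j in range(m - 1, -1, -1):
--         rev.append(row[j] + rev[-1] + below[j] - below[j + 1])
--     rev.reverse()
--     return rev
--
--
-- def solve(A):
--     m = len(A[0])
--     if m < 1:
--         return 0
--     best = A[-1][-1]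
--     below = [0] * (m + 1)
--     for row in reversed(A):
--         below = _suffix_row(row, below, m)
--         best = max(best, max(below[:m]))
--     return best
-- ===== Notes on version B (the rewrite author's own statement) =====
-- stated objective: alternative
-- what changed: Replaces A's two separate phases (a full table of row-wise reversed prefix sums, then a second downward accumulation pass with a running max) by a single fused inclusion-exclusion recurrence S[i][j] = A[i][j] + S[i][j+1] + S[i+1][j] - S[i+1][j+1] over one maintained suffix-sum row, taking the max as it goes.
import Mathlib
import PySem

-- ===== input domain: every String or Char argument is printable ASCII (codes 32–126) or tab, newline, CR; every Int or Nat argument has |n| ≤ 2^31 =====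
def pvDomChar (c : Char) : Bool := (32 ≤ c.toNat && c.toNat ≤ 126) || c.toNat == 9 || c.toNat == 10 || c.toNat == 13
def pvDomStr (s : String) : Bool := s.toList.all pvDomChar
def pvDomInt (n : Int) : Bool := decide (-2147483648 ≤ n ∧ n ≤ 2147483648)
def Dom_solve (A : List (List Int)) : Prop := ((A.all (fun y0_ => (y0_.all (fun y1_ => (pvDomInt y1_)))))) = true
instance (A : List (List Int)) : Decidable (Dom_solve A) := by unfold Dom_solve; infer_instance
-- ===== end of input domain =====

-- B replaces A's two phases (full reversed-prefix table, then a second downward accumulation pass)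
-- with one fused inclusion-exclusion suffix-sum recurrence over a single maintained row (objective: alternative).

-- ===== PORT A =====
-- inner loop of A: prefix_arr_cur for one row (in-place updates become List.set)
def prefixRow (arr : List Int) (m : Nat) : List Int :=
  (PySem.List.pyRange ((m : Int) - 2) (-1) (-1)).foldl
    (fun p j => p.set j.toNat (PySem.List.pyGetD p (j + 1) 0 + PySem.List.pyGetD arr j 0))
    ((List.replicate m (0 : Int)).set (m - 1) (PySem.List.pyGetD arr ((m : Int) - 1) 0))

-- body of A's second loop (state: current accumulated arr, running max_sum)
def stepA (rpa : List (List Int)) (s : List Int × Int) (i : Int) : List Int × Int :=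
  let a := (s.1.zip (PySem.List.pyGetD rpa i [])).map (fun p => p.1 + p.2)
  (a, max s.2 ((PySem.List.max? a (fun y => y)).getD 0))

def solve (A : List (List Int)) : Int :=
  let n := A.length
  let m := (A.headD []).length
  if n < 1 ∨ m < 1 then 0
  else
    let rpa := A.foldl (fun acc arr => acc ++ [prefixRow arr m]) ([] : List (List Int))
    ((PySem.List.pyRange ((n : Int) - 1) (-1) (-1)).foldl (stepA rpa)
      (List.replicate m 0, PySem.List.pyGetD (PySem.List.pyGetD A (-1) []) (-1) 0)).2

-- ===== PORT B =====
-- _suffix_row of Source B: one inclusion-exclusion pass, built rightmost-first then reversed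
def suffixRow (row below : List Int) (m : Nat) : List Int :=
  ((PySem.List.pyRange ((m : Int) - 1) (-1) (-1)).foldl
    (fun rev j => rev ++ [PySem.List.pyGetD row j 0 + PySem.List.pyGetD rev (-1) 0
                          + PySem.List.pyGetD below j 0 - PySem.List.pyGetD below (j + 1) 0]) [0]).reverse

-- body of Source B's loop over reversed(A) (state: current suffix-sum row `below`, running best)
def stepB (m : Nat) (s : List Int × Int) (row : List Int) : List Int × Int :=
  let b := suffixRow row s.1 m
  (b, max s.2 ((PySem.List.max? (PySem.List.slice b none (some (m : Int))) (fun y => y)).getD 0))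

def solve_alt (A : List (List Int)) : Int :=
  let m := (A.headD []).length
  if m < 1 then 0
  else
    (A.reverse.foldl (stepB m)
      (List.replicate (m + 1) 0, PySem.List.pyGetD (PySem.List.pyGetD A (-1) []) (-1) 0)).2

-- ===== PRECONDITION & SPEC =====
-- Python A raises IndexError exactly on empty A (A[0]) and on rows shorter than len(A[0]); B raises there too.
def Pre_solve (A : List (List Int)) : Prop :=
  A ≠ [] ∧ ∀ r ∈ A, (A.headD []).length ≤ r.length
instance (A : List (List Int)) : Decidable (Pre_solve A) := by unfold Pre_solve; infer_instance

def pvWitness_solve : List (List Int) := [[1, -2], [3, 4]]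

def Spec_solve (A : List (List Int)) (out : Int) : Prop := out = solve_alt A
instance (A : List (List Int)) (out : Int) : Decidable (Spec_solve A out) := by unfold Spec_solve; infer_instance

-- ===== CLAIM (what is proved, stated in full; the proofs are below) =====
def Claim_equal_solve : Prop := ∀ (A : List (List Int)), Dom_solve A → Pre_solve A → Spec_solve A (solve A)

-- ===== LEMMAS AND PROOFS =====

-- reversed prefix sums of a row: pfx l = [sum l[0:], sum l[1:], …]
def pfx : List Int → List Int
  | [] => []
  | a :: t => (a + (pfx t).getD 0 0) :: pfx t

-- A's second-loop body with the per-row prefix list supplied directly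
def stepAB (s : List Int × Int) (q : List Int) : List Int × Int :=
  let a := (s.1.zip q).map (fun p => p.1 + p.2)
  (a, max s.2 ((PySem.List.max? a (fun y => y)).getD 0))

theorem pfx_length (l : List Int) : (pfx l).length = l.length := by
  induction l with
  | nil => rfl
  | cons a t ih => simp [pfx, ih]

theorem pfx_getD (l : List Int) (j : Nat) (h : j < l.length) :
    (pfx l).getD j 0 = l.getD j 0 + (pfx l).getD (j + 1) 0 := by
  induction l generalizing j with
  | nil => simp at h
  | cons a t ih =>
    cases j with
    | zero => simp [pfx]
    | succ j =>
      simp only [pfx, List.getD_cons_succ]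
      exact ih j (by simpa using h)

theorem countdownA (xs : List (List Int)) :
    ∀ (k : Nat), k ≤ xs.length → ∀ (init : List Int × Int),
      (PySem.List.pyRange ((k : Int) - 1) (-1) (-1)).foldl (stepA xs) init
        = ((xs.take k).reverse).foldl stepAB init := by
  intro k
  induction k with
  | zero =>
    intro _ init
    rw [show ((0:Nat):Int) - 1 = -1 by norm_num, PySem.List.pyRange_neg_one_eq_nil (by norm_num)]
    simp
  | succ k ih =>
    intro hk init
    rw [show ((k+1:Nat):Int) - 1 = (k:Int) by push_cast; ring,
        PySem.List.pyRange_neg_one_cons (by omega)]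
    rw [List.foldl_cons, ih (by omega)]
    have hx : stepA xs init (k:Int) = stepAB init xs[k] := by
      unfold stepA stepAB
      rw [PySem.List.pyGetD_natCast, List.getD_eq_getElem _ _ (by omega)]
      rfl
    rw [hx, List.take_add_one, List.getElem?_eq_getElem (by omega)]
    rw [Option.toList_some, List.reverse_append, List.reverse_singleton, List.singleton_append,
        List.foldl_cons]
    rfl

theorem prefixLoop (arr : List Int) (m : Nat) (h2 : m ≤ arr.length) :
    ∀ (c : Nat), c ≤ m →
      (PySem.List.pyRange ((c : Int) - 1) (-1) (-1)).foldl
          (fun p j => p.set j.toNat (PySem.List.pyGetD p (j + 1) 0 + PySem.List.pyGetD arr j 0))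
          (List.replicate c 0 ++ (pfx (arr.take m)).drop c)
        = pfx (arr.take m) := by
  intro c
  induction c with
  | zero =>
    intro _
    rw [show ((0:Nat):Int) - 1 = -1 by norm_num, PySem.List.pyRange_neg_one_eq_nil (by norm_num)]
    simp
  | succ c ih =>
    intro hc
    have hPlen : (pfx (arr.take m)).length = m := by
      rw [pfx_length, List.length_take]; omega
    rw [show ((c+1:Nat):Int) - 1 = (c:Int) by push_cast; ring,
        PySem.List.pyRange_neg_one_cons (by omega), List.foldl_cons]
    have hstep :
        (List.replicate (c+1) (0:Int) ++ (pfx (arr.take m)).drop (c+1)).set ((c:Int)).toNat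
          (PySem.List.pyGetD (List.replicate (c+1) (0:Int) ++ (pfx (arr.take m)).drop (c+1)) ((c:Int) + 1) 0
            + PySem.List.pyGetD arr (c:Int) 0)
        = List.replicate c 0 ++ (pfx (arr.take m)).drop c := by
      have hget1 : PySem.List.pyGetD (List.replicate (c+1) (0:Int) ++ (pfx (arr.take m)).drop (c+1)) ((c:Int) + 1) 0
          = (pfx (arr.take m)).getD (c+1) 0 := by
        rw [show ((c:Int) + 1) = ((c+1:Nat):Int) by push_cast; ring, PySem.List.pyGetD_natCast]
        unfold List.getD
        rw [List.getElem?_append_right (by simp), List.length_replicate]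
        simp [List.getElem?_drop]
      have hget2 : PySem.List.pyGetD arr (c:Int) 0 = (arr.take m).getD c 0 := by
        rw [PySem.List.pyGetD_natCast]
        unfold List.getD
        rw [List.getElem?_take_of_lt (by omega)]
      rw [hget1, hget2, Int.toNat_natCast]
      have hval : (arr.take m).getD c 0 + (pfx (arr.take m)).getD (c+1) 0
          = (pfx (arr.take m)).getD c 0 := (pfx_getD (arr.take m) c (by simp; omega)).symm
      rw [Int.add_comm ((pfx (arr.take m)).getD (c+1) 0), hval]
      rw [List.replicate_succ' , List.append_assoc,
          List.set_append_right _ _ (by simp), List.length_replicate, Nat.sub_self]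
      have hdc : (pfx (arr.take m)).drop c = (pfx (arr.take m))[c] :: (pfx (arr.take m)).drop (c+1) :=
        List.drop_eq_getElem_cons (by rw [hPlen]; omega)
      rw [hdc, List.singleton_append, List.set_cons_zero]
      have hgd : (pfx (arr.take m)).getD c 0 = (pfx (arr.take m))[c] :=
        List.getD_eq_getElem _ _ (by rw [hPlen]; omega)
      rw [hgd]
    rw [hstep, ih (by omega)]

theorem prefixRow_eq (arr : List Int) (m : Nat) (h1 : 1 ≤ m) (h2 : m ≤ arr.length) :
    prefixRow arr m = pfx (arr.take m) := by
  unfold prefixRow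
  have hPlen : (pfx (arr.take m)).length = m := by
    rw [pfx_length, List.length_take]; omega
  have hg : PySem.List.pyGetD arr ((m : Int) - 1) 0 = arr.getD (m-1) 0 := by
    rw [show (m:Int)-1 = ((m-1:Nat):Int) by omega, PySem.List.pyGetD_natCast]
  have hval : arr.getD (m-1) 0 = (pfx (arr.take m)).getD (m-1) 0 := by
    have h0 := pfx_getD (arr.take m) (m-1) (by simp; omega)
    have hz : (pfx (arr.take m)).getD ((m-1)+1) 0 = 0 :=
      List.getD_eq_default _ _ (by omega)
    have ht : (arr.take m).getD (m-1) 0 = arr.getD (m-1) 0 := by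
      unfold List.getD
      rw [List.getElem?_take_of_lt (by omega)]
    rw [hz, ht] at h0
    omega
  have hdrop : (pfx (arr.take m)).drop (m-1) = [arr.getD (m-1) 0] := by
    have hl : ((pfx (arr.take m)).drop (m-1)).length = 1 := by
      rw [List.length_drop, hPlen]; omega
    have hh : ((pfx (arr.take m)).drop (m-1)).getD 0 0 = (pfx (arr.take m)).getD (m-1) 0 := by
      unfold List.getD
      rw [List.getElem?_drop]
      norm_num
    cases hcase : (pfx (arr.take m)).drop (m-1) with
    | nil => rw [hcase] at hl; simp at hl
    | cons x t =>
      rw [hcase] at hl hh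
      have ht0 : t = [] := by
        cases t with
        | nil => rfl
        | cons y u => simp at hl
      subst ht0
      simp only [List.getD_cons_zero] at hh
      rw [hh, ← hval]
  have hrep : List.replicate m (0:Int) = List.replicate (m-1) 0 ++ [0] := by
    have hrep' := List.replicate_succ' (n := m-1) (a := (0:Int))
    rw [show (m-1)+1 = m by omega] at hrep'
    exact hrep'
  have hp0 : (List.replicate m (0 : Int)).set (m - 1) (PySem.List.pyGetD arr ((m : Int) - 1) 0)
      = List.replicate (m-1) 0 ++ (pfx (arr.take m)).drop (m-1) := by
    rw [hg, hrep, hdrop, List.set_append_right _ _ (by simp), List.length_replicate, Nat.sub_self]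
    rfl
  rw [hp0, show (m:Int) - 2 = ((m-1:Nat):Int) - 1 by omega]
  exact prefixLoop arr m h2 (m-1) (by omega)

theorem zget (P arr : List Int) (m j : Nat) (hP : P.length = m) (ha : arr.length = m) (hj : j ≤ m) :
    (List.zipWith (· + ·) P arr ++ [0]).getD j 0 = P.getD j 0 + arr.getD j 0 := by
  rcases Nat.lt_or_ge j m with h | h
  · unfold List.getD
    rw [List.getElem?_append_left (by simp; omega),
        List.getElem?_eq_getElem (by simp; omega),
        List.getElem?_eq_getElem (l := P) (i := j) (by omega),
        List.getElem?_eq_getElem (l := arr) (i := j) (by omega)]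
    simp
  · have hjm : j = m := by omega
    subst hjm
    unfold List.getD
    rw [List.getElem?_append_right (by simp; omega),
        List.getElem?_eq_none (l := P) (by omega),
        List.getElem?_eq_none (l := arr) (by omega),
        show j - (List.zipWith (· + ·) P arr).length = 0 by simp; omega]
    simp

theorem belget (arr : List Int) (m j : Nat) (ha : arr.length = m) (hj : j ≤ m) :
    (arr ++ [0]).getD j 0 = arr.getD j 0 := by
  rcases Nat.lt_or_ge j m with h | h
  · unfold List.getD
    rw [List.getElem?_append_left (by omega)]
  · have hjm : j = m := by omega
    subst hjm
    unfold List.getD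
    rw [List.getElem?_append_right (by omega),
        List.getElem?_eq_none (l := arr) (by omega),
        show j - arr.length = 0 by omega]
    simp

theorem suffixLoop (row arr : List Int) (m : Nat) (h2 : m ≤ row.length) (ha : arr.length = m) :
    ∀ (c : Nat), c ≤ m →
      (PySem.List.pyRange ((c : Int) - 1) (-1) (-1)).foldl
        (fun rev j => rev ++ [PySem.List.pyGetD row j 0 + PySem.List.pyGetD rev (-1) 0
           + PySem.List.pyGetD (arr ++ [0]) j 0 - PySem.List.pyGetD (arr ++ [0]) (j + 1) 0])
        (((List.zipWith (· + ·) (pfx (row.take m)) arr ++ [0]).drop c).reverse)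
      = (List.zipWith (· + ·) (pfx (row.take m)) arr ++ [0]).reverse := by
  have hPlen : (pfx (row.take m)).length = m := by
    rw [pfx_length, List.length_take]; omega
  have hZlen : (List.zipWith (· + ·) (pfx (row.take m)) arr ++ [0]).length = m + 1 := by
    simp [hPlen, ha]
  set Z := List.zipWith (· + ·) (pfx (row.take m)) arr ++ [0] with hZ
  intro c
  induction c with
  | zero =>
    intro _
    rw [show ((0:Nat):Int) - 1 = -1 by norm_num, PySem.List.pyRange_neg_one_eq_nil (by norm_num)]
    simp
  | succ c ih =>
    intro hc
    rw [show ((c+1:Nat):Int) - 1 = (c:Int) by push_cast; ring,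
        PySem.List.pyRange_neg_one_cons (by omega), List.foldl_cons]
    have hdrop1 : Z.drop (c+1) = Z.getD (c+1) 0 :: Z.drop (c+2) := by
      rw [List.drop_eq_getElem_cons (by omega), List.getD_eq_getElem _ _ (by omega)]
    have hrevlast : PySem.List.pyGetD ((Z.drop (c+1)).reverse) (-1) 0 = Z.getD (c+1) 0 := by
      rw [hdrop1, List.reverse_cons, PySem.List.pyGetD_neg_one_append_singleton]
    have hrow : PySem.List.pyGetD row ((c:Int)) 0 = row.getD c 0 := PySem.List.pyGetD_natCast ..
    have hb1 : PySem.List.pyGetD (arr ++ [0]) ((c:Int)) 0 = arr.getD c 0 := by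
      rw [PySem.List.pyGetD_natCast]; exact belget arr m c ha (by omega)
    have hb2 : PySem.List.pyGetD (arr ++ [0]) ((c:Int) + 1) 0 = arr.getD (c+1) 0 := by
      rw [show (c:Int) + 1 = ((c+1:Nat):Int) by push_cast; ring, PySem.List.pyGetD_natCast]
      exact belget arr m (c+1) ha (by omega)
    have hv : row.getD c 0 + Z.getD (c+1) 0 + arr.getD c 0 - arr.getD (c+1) 0 = Z.getD c 0 := by
      have hz1 := zget (pfx (row.take m)) arr m (c+1) hPlen ha (by omega)
      have hz0 := zget (pfx (row.take m)) arr m c hPlen ha (by omega)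
      have hp := pfx_getD (row.take m) c (by simp; omega)
      have ht : (row.take m).getD c 0 = row.getD c 0 := by
        unfold List.getD
        rw [List.getElem?_take_of_lt (by omega)]
      rw [← hZ] at hz1 hz0
      rw [ht] at hp
      omega
    rw [hrevlast, hrow, hb1, hb2, hv]
    have hstep : (Z.drop (c+1)).reverse ++ [Z.getD c 0] = (Z.drop c).reverse := by
      rw [List.drop_eq_getElem_cons (l := Z) (i := c) (by omega), List.reverse_cons,
          List.getD_eq_getElem _ _ (by omega)]
    rw [hstep]
    exact ih (by omega)

theorem suffixRow_eq (row arr : List Int) (m : Nat) (h2 : m ≤ row.length) (ha : arr.length = m) :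
    suffixRow row (arr ++ [0]) m = List.zipWith (· + ·) (pfx (row.take m)) arr ++ [0] := by
  unfold suffixRow
  have hPlen : (pfx (row.take m)).length = m := by
    rw [pfx_length, List.length_take]; omega
  have hziplen : (List.zipWith (· + ·) (pfx (row.take m)) arr).length = m := by
    simp [hPlen, ha]
  have hinit : ([0] : List Int)
      = ((List.zipWith (· + ·) (pfx (row.take m)) arr ++ [0]).drop m).reverse := by
    rw [List.drop_left' hziplen]
    rfl
  have hsl := suffixLoop row arr m h2 ha m (by omega)
  rw [← hinit] at hsl
  rw [hsl, List.reverse_reverse]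

theorem sim (m : Nat) :
    ∀ (rows : List (List Int)), (∀ r ∈ rows, m ≤ r.length) →
      ∀ (arr : List Int) (ms : Int), arr.length = m →
        rows.foldl (stepB m) (arr ++ [0], ms)
          = ((rows.foldl (fun s r => stepAB s (pfx (r.take m))) (arr, ms)).1 ++ [0],
             (rows.foldl (fun s r => stepAB s (pfx (r.take m))) (arr, ms)).2) := by
  intro rows
  induction rows with
  | nil => intro _ arr ms _; rfl
  | cons r rows ih =>
    intro hlen arr ms ha
    rw [List.foldl_cons, List.foldl_cons]
    have hr : m ≤ r.length := hlen r (by simp)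
    have hsrow : suffixRow r (arr ++ [0]) m = List.zipWith (· + ·) (pfx (r.take m)) arr ++ [0] :=
      suffixRow_eq r arr m hr ha
    have hzipc : List.zipWith (· + ·) (pfx (r.take m)) arr = List.zipWith (· + ·) arr (pfx (r.take m)) := by
      rw [List.zipWith_comm]
      simp [Int.add_comm]
    have hzipm : (arr.zip (pfx (r.take m))).map (fun p => p.1 + p.2)
        = List.zipWith (· + ·) arr (pfx (r.take m)) := by
      simp [List.zip, List.map_zipWith]
    have hstep : stepB m (arr ++ [0], ms) r
        = ((stepAB (arr, ms) (pfx (r.take m))).1 ++ [0], (stepAB (arr, ms) (pfx (r.take m))).2) := by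
      simp only [stepB, stepAB]
      rw [hsrow]
      have htake : PySem.List.slice (List.zipWith (· + ·) (pfx (r.take m)) arr ++ [0]) none (some (m : Int))
          = List.zipWith (· + ·) (pfx (r.take m)) arr := by
        rw [PySem.List.slice_to_natCast, List.take_left' (by rw [List.length_zipWith, pfx_length]; simp [ha]; omega)]
      rw [htake, hzipm, hzipc]
    rw [hstep]
    have ha' : (stepAB (arr, ms) (pfx (r.take m))).1.length = m := by
      unfold stepAB
      rw [hzipm]
      rw [List.length_zipWith, pfx_length, List.length_take, ha]
      omega
    exact ih (fun x hx => hlen x (by simp [hx])) _ _ ha'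

-- ===== VERDICT (by name: the statement is the Claim_ definition above) =====
theorem solve_spec : Claim_equal_solve := by
  intro A _ hpre
  unfold Spec_solve
  obtain ⟨hne, hrows⟩ := hpre
  have hlenA : 1 ≤ A.length := List.length_pos_of_ne_nil hne
  rcases Nat.eq_zero_or_pos (A.headD []).length with hm0 | hm1
  · simp only [solve, solve_alt]
    rw [if_pos (by omega), if_pos (by omega)]
  · simp only [solve, solve_alt]
    rw [if_neg (by omega), if_neg (by omega)]
    rw [PySem.List.foldl_append_singleton_eq_map, List.nil_append]
    rw [countdownA _ A.length (by simp)]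
    rw [show (A.map (fun arr => prefixRow arr (A.headD []).length)).take A.length
          = A.map (fun arr => prefixRow arr (A.headD []).length) from
        List.take_of_length_le (by simp)]
    rw [← List.map_reverse, List.foldl_map]
    have hAside := PySem.List.foldl_congr_mem
        (l := A.reverse)
        (init := (List.replicate (A.headD []).length (0:Int),
                  PySem.List.pyGetD (PySem.List.pyGetD A (-1) []) (-1) 0))
        (f := fun x (y : List Int) => stepAB x (prefixRow y (A.headD []).length))
        (g := fun s (r : List Int) => stepAB s (pfx (r.take (A.headD []).length)))
        (fun acc x hx => by
          show stepAB acc (prefixRow x (A.headD []).length)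
              = stepAB acc (pfx (x.take (A.headD []).length))
          rw [prefixRow_eq x (A.headD []).length hm1 (hrows x (List.mem_reverse.mp hx))])
    rw [hAside]
    rw [show List.replicate ((A.headD []).length + 1) (0:Int)
          = List.replicate (A.headD []).length 0 ++ [0] from List.replicate_succ' (a := (0:Int)) (n := (A.headD []).length)]
    rw [sim (A.headD []).length A.reverse
        (fun r hr => hrows r (List.mem_reverse.mp hr))
        (List.replicate (A.headD []).length 0) _ (by simp)]
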